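-- pv_equiv track=rewrite | github.com/rosinaSav/DFE_paper_repo | bedtools_games.py | get_exon_ranks
-- ===== SOURCE A (Python) =====
-- def get_exon_ranks(exons, reverse = False, limit = None):
--     ranks_dict = {}
--     if limit:
--         max_rank = limit
--     else:
--         exon_numbers = [len(i) for i in exons]
--         max_rank = max(exon_numbers) - 1
--     if reverse:
--         [exons[i].reverse() for i in exons]
--     for rank in range(max_rank):
--         ranks_dict[rank] = [exons[i][rank] for i in exons if len(exons[i]) > rank]
--     return(ranks_dict)
-- ===== SOURCE B (Python) =====
-- def get_exon_ranks(exons, reverse = False, limit = None):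
--     # One pass over the exons, appending each element to its rank's bucket,
--     # instead of re-scanning every exon once per rank.
--     # Like A, when `reverse` is set the exon lists are reversed IN PLACE.
--     if limit:
--         max_rank = limit
--     else:
--         max_rank = max(len(i) for i in exons) - 1
--     buckets = {}
--     for name in exons:
--         seq = exons[name]
--         if reverse:
--             seq.reverse()
--         for rank in range(min(len(seq), max_rank)):
--             buckets.setdefault(rank, []).append(seq[rank])
--     return {rank: buckets.get(rank, []) for rank in range(max_rank)}
-- ===== Notes on version B (the rewrite author's own statement) =====
-- stated objective: faster
-- what changed: B replaces A's outer loop over ranks with an inner scan of every exon per rank by a single pass over the exons that appends each element to a per-rank bucket dict, then emits the buckets for ranks 0..max_rank-1.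
import Mathlib
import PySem

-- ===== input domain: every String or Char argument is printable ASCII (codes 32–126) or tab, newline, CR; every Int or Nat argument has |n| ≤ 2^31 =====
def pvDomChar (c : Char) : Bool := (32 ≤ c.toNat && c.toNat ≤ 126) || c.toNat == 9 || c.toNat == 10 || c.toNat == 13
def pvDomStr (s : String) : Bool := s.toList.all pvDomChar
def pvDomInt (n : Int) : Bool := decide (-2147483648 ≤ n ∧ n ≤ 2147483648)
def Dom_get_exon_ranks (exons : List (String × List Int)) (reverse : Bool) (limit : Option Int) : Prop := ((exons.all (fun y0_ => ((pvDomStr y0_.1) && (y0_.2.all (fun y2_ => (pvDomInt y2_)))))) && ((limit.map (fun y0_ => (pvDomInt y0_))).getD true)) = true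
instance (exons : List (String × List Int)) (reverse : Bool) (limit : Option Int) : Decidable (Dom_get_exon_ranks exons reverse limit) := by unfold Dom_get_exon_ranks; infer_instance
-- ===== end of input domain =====

-- B: one pass over the exons appending each element to a per-rank bucket, instead of one scan of
-- all exons per rank. With reverse, both Pythons reverse the exon lists in place; the equivalence
-- proved here is about the return value.

-- ===== PORT A =====
-- shared by both Pythons verbatim: 'max_rank = limit if limit else max([len(i) for i in exons]) - 1'
-- (len of the KEY string, as both sources have it)
def pvMaxRank (exons : List (String × List Int)) (limit : Option Int) : Int :=
  if limit.getD 0 ≠ 0 then limit.getD 0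
  else (PySem.List.max? (exons.map (fun i => PySem.Str.len i.1)) (fun x => x)).getD 0 - 1

def get_exon_ranks (exons : List (String × List Int)) (reverse : Bool) (limit : Option Int) : List (Int × List Int) :=
  let max_rank : Int := pvMaxRank exons limit
  -- if reverse: [exons[i].reverse() for i in exons]
  let exonsR := if reverse then exons.map (fun p => (p.1, p.2.reverse)) else exons
  -- for rank in range(max_rank): ranks_dict[rank] = [exons[i][rank] for i in exons if len(exons[i]) > rank]
  ((PySem.List.pyRange 0 max_rank 1).foldl
    (fun (d : PySem.Dict Int (List Int)) rank =>
      d.insert rank (exonsR.filterMap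
        (fun p => if rank < (p.2.length : Int) then PySem.List.pyGet? p.2 rank else none)))
    PySem.Dict.empty).items

-- ===== PORT B =====
def get_exon_ranks_alt (exons : List (String × List Int)) (reverse : Bool) (limit : Option Int) : List (Int × List Int) :=
  let max_rank : Int := pvMaxRank exons limit
  -- single pass: for rank in range(min(len(seq), max_rank)): buckets.setdefault(rank, []).append(seq[rank])
  let buckets : PySem.Dict Int (List Int) :=
    exons.foldl
      (fun d p =>
        let seq := if reverse then p.2.reverse else p.2
        (PySem.List.pyRange 0 (min (seq.length : Int) max_rank) 1).foldl
          (fun d rank => d.insert rank (d.getD rank [] ++ [(PySem.List.pyGet? seq rank).getD 0])) d)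
      PySem.Dict.empty
  -- return {rank: buckets.get(rank, []) for rank in range(max_rank)}
  (PySem.List.pyRange 0 max_rank 1).map (fun rank => (rank, buckets.getD rank []))

-- ===== PRECONDITION & SPEC =====
-- Pre_ excludes association lists with duplicate keys (a Python dict cannot hold them) and the
-- empty dict with a falsy limit, on which A's max() raises ValueError.
def Pre_get_exon_ranks (exons : List (String × List Int)) (reverse : Bool) (limit : Option Int) : Prop :=
  (exons.map Prod.fst).Nodup ∧ (limit.getD 0 ≠ 0 ∨ exons ≠ [])
instance (exons : List (String × List Int)) (reverse : Bool) (limit : Option Int) : Decidable (Pre_get_exon_ranks exons reverse limit) := by unfold Pre_get_exon_ranks; infer_instance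
def pvWitness_get_exon_ranks : (List (String × List Int)) × Bool × Option Int := ([("ab", [1, 2]), ("cde", [3])], false, none)

def Spec_get_exon_ranks (exons : List (String × List Int)) (reverse : Bool) (limit : Option Int) (out : List (Int × List Int)) : Prop := out = get_exon_ranks_alt exons reverse limit
instance (exons : List (String × List Int)) (reverse : Bool) (limit : Option Int) (out : List (Int × List Int)) : Decidable (Spec_get_exon_ranks exons reverse limit out) := by unfold Spec_get_exon_ranks; infer_instance

-- ===== CLAIM (what is proved, stated in full; the proofs are below) =====
def Claim_equal_get_exon_ranks : Prop := ∀ (exons : List (String × List Int)) (reverse : Bool) (limit : Option Int), Dom_get_exon_ranks exons reverse limit → Pre_get_exon_ranks exons reverse limit → Spec_get_exon_ranks exons reverse limit (get_exon_ranks exons reverse limit)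

-- ===== LEMMAS AND PROOFS =====

theorem pv_get_some (xs : List Int) (i : Int) (h0 : 0 ≤ i) (h : i < (xs.length : Int)) :
    PySem.List.pyGet? xs i = some ((PySem.List.pyGet? xs i).getD 0) := by
  rw [PySem.List.pyGet?_eq_some_getElem xs h0 h]
  rfl

-- effect of B's inner bucket loop on one lookup (Nat bound)
theorem pv_inner_nat (seq : List Int) (n : Nat) (d : PySem.Dict Int (List Int)) (r : Int) :
    ((PySem.List.pyRange 0 (n : Int) 1).foldl
      (fun d rank => d.insert rank (d.getD rank [] ++ [(PySem.List.pyGet? seq rank).getD 0])) d).getD r []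
    = d.getD r [] ++ (if 0 ≤ r ∧ r < (n : Int) then [(PySem.List.pyGet? seq r).getD 0] else []) := by
  induction n generalizing d with
  | zero =>
    rw [PySem.List.pyRange_one_eq_nil (by omega), if_neg (by omega)]
    simp
  | succ n ih =>
    rw [show ((n + 1 : Nat) : Int) = (n : Int) + 1 by push_cast; ring,
        PySem.List.pyRange_one_succ_right (by positivity), List.foldl_append]
    simp only [List.foldl_cons, List.foldl_nil]
    rw [PySem.Dict.getD_insert]
    by_cases hr : r = (n : Int)
    · subst hr
      rw [if_pos rfl, ih, if_neg (by omega), if_pos (by constructor <;> omega)]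
      simp
    · rw [if_neg hr, ih]
      by_cases hcond : 0 ≤ r ∧ r < (n : Int)
      · rw [if_pos hcond, if_pos ⟨hcond.1, by omega⟩]
      · rw [if_neg hcond, if_neg (by omega)]

-- the same for an arbitrary Int bound
theorem pv_inner (seq : List Int) (b : Int) (d : PySem.Dict Int (List Int)) (r : Int) :
    ((PySem.List.pyRange 0 b 1).foldl
      (fun d rank => d.insert rank (d.getD rank [] ++ [(PySem.List.pyGet? seq rank).getD 0])) d).getD r []
    = d.getD r [] ++ (if 0 ≤ r ∧ r < b then [(PySem.List.pyGet? seq r).getD 0] else []) := by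
  rcases le_or_gt b 0 with hb | hb
  · rw [PySem.List.pyRange_one_eq_nil hb]; simp; omega
  · have hbn : b = ((b.toNat : Nat) : Int) := by omega
    rw [hbn]; exact pv_inner_nat seq b.toNat d r

-- effect of B's outer pass: each in-range bucket accumulates A's comprehension for that rank
theorem pv_outer (exons : List (String × List Int)) (reverse : Bool) (M : Int)
    (d : PySem.Dict Int (List Int)) (r : Int) (hr : 0 ≤ r) (hrM : r < M) :
    (exons.foldl
      (fun d p =>
        let seq := if reverse then p.2.reverse else p.2
        (PySem.List.pyRange 0 (min ((seq.length : Int)) M) 1).foldl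
          (fun d rank => d.insert rank (d.getD rank [] ++ [(PySem.List.pyGet? seq rank).getD 0])) d)
      d).getD r []
    = d.getD r [] ++ exons.filterMap
        (fun p =>
          let seq := if reverse then p.2.reverse else p.2
          if r < (seq.length : Int) then PySem.List.pyGet? seq r else none) := by
  induction exons generalizing d with
  | nil => simp
  | cons p t ih =>
    simp only [List.foldl_cons, List.filterMap_cons]
    rw [ih, pv_inner]
    by_cases hlen : r < (((if reverse then p.2.reverse else p.2).length : Nat) : Int)
    · rw [if_pos ⟨hr, by simp; omega⟩]
      simp only [hlen, if_pos]
      rw [pv_get_some _ r hr hlen]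
      simp
    · rw [if_neg (by simp; omega)]
      simp only [hlen, if_false, List.append_nil]

-- A's per-rank comprehension over the (possibly reversed) dict, rewritten over the original list
theorem pv_bridge (exons : List (String × List Int)) (reverse : Bool) (r : Int) :
    (if reverse then exons.map (fun p => (p.1, p.2.reverse)) else exons).filterMap
      (fun p => if r < (p.2.length : Int) then PySem.List.pyGet? p.2 r else none)
    = exons.filterMap
        (fun p =>
          let seq := if reverse then p.2.reverse else p.2
          if r < (seq.length : Int) then PySem.List.pyGet? seq r else none) := by
  cases reverse <;> simp [List.filterMap_map]

-- ===== VERDICT (by name: the statement is the Claim_ definition above) =====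
theorem get_exon_ranks_spec : Claim_equal_get_exon_ranks := by
  intro exons reverse limit _ _
  show get_exon_ranks exons reverse limit = get_exon_ranks_alt exons reverse limit
  unfold get_exon_ranks get_exon_ranks_alt
  rw [PySem.Dict.items_foldl_insert_fresh _ _ _ _
        (by intro a _; exact PySem.Dict.contains_empty a)
        (by simpa using PySem.List.nodup_pyRange_one 0 (pvMaxRank exons limit))]
  simp only [show (PySem.Dict.empty : PySem.Dict Int (List Int)).items = [] from rfl, List.nil_append]
  apply List.map_congr_left
  intro r hrmem
  rw [PySem.List.mem_pyRange_one] at hrmem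
  rw [pv_outer exons reverse (pvMaxRank exons limit) PySem.Dict.empty r hrmem.1 hrmem.2,
      PySem.Dict.getD_empty, List.nil_append, pv_bridge]
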